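-- pv_equiv track=rewrite | github.com/apet97/rag | src/article_context.py | _group_chunks_by_url
-- ===== SOURCE A (Python) =====
-- from collections import defaultdict
-- from typing import Any, Dict, List, Literal, Optional
--
-- def _group_chunks_by_url(
--     search_results: List[Dict[str, Any]]
-- ) -> Dict[str, List[Dict[str, Any]]]:
--     """
--     Group search result chunks by URL.
--
--     Args:
--         search_results: List of chunk results
--
--     Returns:
--         Dict mapping URL to list of chunks
--     """
--     grouped = defaultdict(list)
--
--     for result in search_results:
--         url = result.get("url", "")
--         if url:
--             grouped[url].append(result)
--
--     return dict(grouped)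
-- ===== SOURCE B (Python) =====
-- def _group_chunks_by_url(search_results):
--     """Two-phase grouping: collect distinct non-empty URLs in first-occurrence
--     order, then build each group with one filtering pass over the input."""
--     order = []
--     for result in search_results:
--         url = result.get("url", "")
--         if url and url not in order:
--             order.append(url)
--     return {url: [r for r in search_results if r.get("url", "") == url]
--             for url in order}
-- ===== Notes on version B (the rewrite author's own statement) =====
-- stated objective: alternative
-- what changed: Replaces single-pass defaultdict accumulation with a two-phase scheme: first collect the distinct non-empty urls in first-occurrence order, then build each group's chunk list by a separate filter pass over the input.
import Mathlib
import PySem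

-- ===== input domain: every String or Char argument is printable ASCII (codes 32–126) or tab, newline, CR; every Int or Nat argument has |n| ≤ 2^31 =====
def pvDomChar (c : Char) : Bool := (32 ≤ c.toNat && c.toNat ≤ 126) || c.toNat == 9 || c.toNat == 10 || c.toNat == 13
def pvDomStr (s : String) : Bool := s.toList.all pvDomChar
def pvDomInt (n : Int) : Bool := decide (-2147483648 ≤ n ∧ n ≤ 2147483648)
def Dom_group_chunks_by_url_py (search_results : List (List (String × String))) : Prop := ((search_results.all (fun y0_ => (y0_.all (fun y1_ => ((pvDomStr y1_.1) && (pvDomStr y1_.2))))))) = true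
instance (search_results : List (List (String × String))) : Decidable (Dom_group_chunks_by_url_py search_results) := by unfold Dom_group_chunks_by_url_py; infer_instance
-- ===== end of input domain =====

-- B replaces A's single-pass defaultdict accumulation with a two-phase scheme (collect the
-- distinct non-empty urls in first-occurrence order, then one filter pass per url); same
-- return value, no speed claim.

-- ===== PORT A =====
-- grouped = defaultdict(list); for result: url = result.get("url",""); if url: grouped[url].append(result); return dict(grouped)
def group_chunks_by_url_py (search_results : List (List (String × String))) : List (String × List (List (String × String))) :=
  (search_results.foldl
    (fun grouped result =>
      let url := PySem.Dict.getD (PySem.Dict.mk result) "url" ""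
      if url ≠ "" then grouped.modify url [] (fun v => v ++ [result]) else grouped)
    PySem.Dict.empty).items

-- ===== PORT B =====
-- order = []; for result: url = result.get("url",""); if url and url not in order: order.append(url);
-- return {url: [r for r in search_results if r.get("url","") == url] for url in order}
def group_chunks_by_url_py_alt (search_results : List (List (String × String))) : List (String × List (List (String × String))) :=
  let order := search_results.foldl
    (fun order result =>
      let url := PySem.Dict.getD (PySem.Dict.mk result) "url" ""
      if url ≠ "" ∧ url ∉ order then order ++ [url] else order)
    []
  order.map (fun url =>
    (url, search_results.filter (fun r => PySem.Dict.getD (PySem.Dict.mk r) "url" "" == url)))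

-- ===== PRECONDITION & SPEC =====
def Spec_group_chunks_by_url_py (search_results : List (List (String × String))) (out : List (String × List (List (String × String)))) : Prop := out = group_chunks_by_url_py_alt search_results
instance (search_results : List (List (String × String))) (out : List (String × List (List (String × String)))) : Decidable (Spec_group_chunks_by_url_py search_results out) := by unfold Spec_group_chunks_by_url_py; infer_instance

-- ===== CLAIM (what is proved, stated in full; the proofs are below) =====
def Claim_equal_group_chunks_by_url_py : Prop := ∀ (search_results : List (List (String × String))), Dom_group_chunks_by_url_py search_results → Spec_group_chunks_by_url_py search_results (group_chunks_by_url_py search_results)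

-- ===== LEMMAS AND PROOFS =====

-- the url a row is grouped under (shared shape of `result.get("url", "")` in both ports)
def pvUrl (r : List (String × String)) : String := PySem.Dict.getD (PySem.Dict.mk r) "url" ""

-- the rows with a truthy url, in input order
def pvKept (sr : List (List (String × String))) : List (List (String × String)) :=
  sr.filter (fun r => decide (pvUrl r ≠ ""))

-- A's accumulating fold is the unconditional grouping fold over the kept rows
theorem pvA_eq_fold_kept (sr : List (List (String × String))) :
    group_chunks_by_url_py sr =
      ((pvKept sr).foldl (fun d r => d.modify (pvUrl r) [] (fun v => v ++ [r])) PySem.Dict.empty).items := by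
  unfold group_chunks_by_url_py pvKept
  rw [List.foldl_filter]
  simp only [pvUrl, decide_eq_true_eq]

-- B's order fold is `set` addition over the kept rows' urls
theorem pvOrder_eq_ofList (sr : List (List (String × String))) :
    sr.foldl
      (fun order result =>
        let url := PySem.Dict.getD (PySem.Dict.mk result) "url" ""
        if url ≠ "" ∧ url ∉ order then order ++ [url] else order)
      [] = PySem.Set.ofList ((pvKept sr).map pvUrl) := by
  rw [← PySem.Set.update_nil_left, PySem.Set.update_map_eq_foldl_add, pvKept, List.foldl_filter]
  have hstep : (fun (order : List String) (result : List (String × String)) =>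
      let url := PySem.Dict.getD (PySem.Dict.mk result) "url" ""
      if url ≠ "" ∧ url ∉ order then order ++ [url] else order) =
      (fun x y => if decide (pvUrl y ≠ "") = true then PySem.Set.add x (pvUrl y) else x) := by
    funext acc r
    simp only [decide_eq_true_eq, PySem.Set.add_eq_ite, pvUrl]
    by_cases h1 : PySem.Dict.getD (PySem.Dict.mk r) "url" "" = "" <;>
      by_cases h2 : PySem.Dict.getD (PySem.Dict.mk r) "url" "" ∈ acc <;>
      simp [h1, h2]
  rw [hstep]

-- filtering the kept rows by a non-empty url is filtering the whole input by it
theorem pvFilter_kept (sr : List (List (String × String))) (u : String) (hu : u ≠ "") :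
    (pvKept sr).filter (fun r => pvUrl r == u) = sr.filter (fun r => pvUrl r == u) := by
  unfold pvKept
  rw [List.filter_filter]
  apply List.filter_congr
  intro r _
  by_cases h : pvUrl r = u
  · simp [h, hu]
  · simp [h]

theorem group_chunks_by_url_py_spec' (sr : List (List (String × String))) :
    group_chunks_by_url_py sr = group_chunks_by_url_py_alt sr := by
  rw [pvA_eq_fold_kept]
  unfold group_chunks_by_url_py_alt
  rw [pvOrder_eq_ofList]
  have hnd : ((pvKept sr).foldl (fun d r => d.modify (pvUrl r) [] (fun v => v ++ [r]))
      PySem.Dict.empty).keys.Nodup := by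
    apply PySem.Dict.nodup_keys_foldl_modify_key
    simp [PySem.Dict.keys_empty]
  rw [PySem.Dict.items_eq_map_keys _ hnd []]
  rw [PySem.Dict.keys_foldl_modify_key, PySem.Dict.keys_empty, PySem.Set.update_nil_left]
  apply List.map_congr_left
  intro u hu
  rw [PySem.Set.mem_ofList] at hu
  obtain ⟨r, hr, hru⟩ := List.mem_map.mp hu
  have hne : u ≠ "" := by
    have := List.of_mem_filter hr
    simp only [decide_eq_true_eq] at this
    rwa [hru] at this
  have hfold : ((pvKept sr).foldl (fun d r => d.modify (pvUrl r) [] (fun v => v ++ [r]))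
        PySem.Dict.empty).getD u [] = (pvKept sr).filter (fun r => pvUrl r == u) := by
    have := PySem.Dict.getD_foldl_modify_append
      ((pvKept sr).map (fun r => (pvUrl r, r))) PySem.Dict.empty u
    rw [List.foldl_map] at this
    simp only [PySem.Dict.getD_empty, List.nil_append, List.filter_map, List.map_map,
      Function.comp_def, List.map_id'] at this
    exact this
  rw [hfold, pvFilter_kept sr u hne]
  rfl

-- ===== VERDICT (by name: the statement is the Claim_ definition above) =====
theorem group_chunks_by_url_py_spec : Claim_equal_group_chunks_by_url_py := by
  intro sr _
  unfold Spec_group_chunks_by_url_py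
  exact group_chunks_by_url_py_spec' sr
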